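-- pv_equiv track=rewrite | github.com/iiLiniesta/acm.whu.edu.cn-weblearn | 114. Bullseye/114.py | work
-- ===== SOURCE A (Python) =====
-- def score(x,y):
--     r = 3
--     d2 = x * x + y * y
--     while r * r < d2 and r <= 15:
--         r += 3
--     ans = (6 - (r // 3)) * 20
--     return ans
--
-- def work(s):
--     a1 = 0
--     for i in range(0,6,2):
--         a1 += score(s[i], s[i+1])
--     a2 = 0
--     for i in range(6,12,2):
--         a2 += score(s[i], s[i+1])
--     ans = "SCORE: %d to %d, " % (a1, a2)
--     if a1 > a2:
--         ans += "PLAYER 1 WINS."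
--     elif a1 < a2:
--         ans += "PLAYER 2 WINS."
--     else:
--         ans += "TIE."
--
--     return ans
-- ===== SOURCE B (Python) =====
-- def work(s):
--     # Loop-free rewrite: unpack the twelve coordinates directly and score each
--     # shot with a balanced binary decision tree over the squared distance.
--     x1, y1, x2, y2, x3, y3, x4, y4, x5, y5, x6, y6 = s[:12]
--
--     def pts(x, y):
--         d2 = x * x + y * y
--         if d2 <= 81:
--             return 100 if d2 <= 9 else 80 if d2 <= 36 else 60
--         return 40 if d2 <= 144 else 20 if d2 <= 225 else 0
--
--     a1 = pts(x1, y1) + pts(x2, y2) + pts(x3, y3)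
--     a2 = pts(x4, y4) + pts(x5, y5) + pts(x6, y6)
--     tail = "PLAYER 1 WINS." if a1 > a2 else "PLAYER 2 WINS." if a1 < a2 else "TIE."
--     return "SCORE: %d to %d, " % (a1, a2) + tail
-- ===== Notes on version B (the rewrite author's own statement) =====
-- stated objective: simpler
-- what changed: Eliminates all loops: A searches the ring radius with a per-shot incremental while loop and accumulates scores in two index-range for loops, while B unpacks the twelve coordinates by destructuring and scores each shot with a balanced binary decision tree of comparisons on the squared distance, summing the two flat triples directly.
import Mathlib
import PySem

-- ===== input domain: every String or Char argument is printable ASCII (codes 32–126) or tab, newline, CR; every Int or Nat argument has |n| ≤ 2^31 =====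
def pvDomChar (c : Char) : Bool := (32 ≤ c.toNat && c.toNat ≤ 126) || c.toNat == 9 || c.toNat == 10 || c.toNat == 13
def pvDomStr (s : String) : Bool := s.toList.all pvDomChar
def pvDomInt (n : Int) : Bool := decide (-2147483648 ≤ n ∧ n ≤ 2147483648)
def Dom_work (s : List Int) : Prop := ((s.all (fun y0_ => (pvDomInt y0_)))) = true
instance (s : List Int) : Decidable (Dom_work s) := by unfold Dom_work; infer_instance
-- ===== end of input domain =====

-- B removes all loops: A's incremental while-loop radius search becomes a balanced binary
-- decision tree on the squared distance, and A's two index-range for loops become direct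
-- destructuring of the twelve coordinates with flat three-term sums (objective: simpler).

-- ===== PORT A =====
-- while r*r < d2 and r <= 15: r += 3   (at most 5 iterations; fuel 6 is enough)
def scoreLoop (d2 : Int) : Int → Nat → Int
  | r, 0 => r
  | r, Nat.succ n => if r * r < d2 ∧ r ≤ 15 then scoreLoop d2 (r + 3) n else r

def score (x y : Int) : Int :=
  let d2 := x * x + y * y
  let r := scoreLoop d2 3 6
  (6 - PySem.Int.floordiv r 3) * 20

-- s[i] : exact under Pre_work (length ≥ 12); outside it Python raises IndexError and
-- pyGetD's default 0 is never what is claimed about.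
def work (s : List Int) : String :=
  let a1 := (PySem.List.pyRange 0 6 2).foldl
    (fun acc i => acc + score (PySem.List.pyGetD s i 0) (PySem.List.pyGetD s (i+1) 0)) 0
  let a2 := (PySem.List.pyRange 6 12 2).foldl
    (fun acc i => acc + score (PySem.List.pyGetD s i 0) (PySem.List.pyGetD s (i+1) 0)) 0
  let ans := "SCORE: " ++ PySem.Int.toStr a1 ++ " to " ++ PySem.Int.toStr a2 ++ ", "
  if a1 > a2 then ans ++ "PLAYER 1 WINS."
  else if a1 < a2 then ans ++ "PLAYER 2 WINS."
  else ans ++ "TIE."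

-- ===== PORT B =====
def pts (x y : Int) : Int :=
  let d2 := x * x + y * y
  if d2 ≤ 81 then (if d2 ≤ 9 then 100 else if d2 ≤ 36 then 80 else 60)
  else (if d2 ≤ 144 then 40 else if d2 ≤ 225 then 20 else 0)

-- the 12-tuple unpacking of s[:12]; shorter lists raise ValueError in Python B and are
-- outside Pre_work (the "" branch is unreachable under Pre_work).
def work_alt (s : List Int) : String :=
  match s with
  | x1 :: y1 :: x2 :: y2 :: x3 :: y3 :: x4 :: y4 :: x5 :: y5 :: x6 :: y6 :: _ =>
    let a1 := pts x1 y1 + pts x2 y2 + pts x3 y3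
    let a2 := pts x4 y4 + pts x5 y5 + pts x6 y6
    let tail := if a1 > a2 then "PLAYER 1 WINS." else if a1 < a2 then "PLAYER 2 WINS." else "TIE."
    "SCORE: " ++ PySem.Int.toStr a1 ++ " to " ++ PySem.Int.toStr a2 ++ ", " ++ tail
  | _ => ""

-- ===== PRECONDITION & SPEC =====
-- Pre_ excludes lists with fewer than 12 elements, where Python A raises IndexError.
def Pre_work (s : List Int) : Prop := 12 ≤ s.length
instance (s : List Int) : Decidable (Pre_work s) := by unfold Pre_work; infer_instance
def pvWitness_work : List Int := [0,0,4,0,7,0,10,0,13,0,16,0]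

def Spec_work (s : List Int) (out : String) : Prop := out = work_alt s
instance (s : List Int) (out : String) : Decidable (Spec_work s out) := by unfold Spec_work; infer_instance

-- ===== CLAIM (what is proved, stated in full; the proofs are below) =====
def Claim_equal_work : Prop := ∀ (s : List Int), Dom_work s → Pre_work s → Spec_work s (work s)

-- ===== LEMMAS AND PROOFS =====
set_option maxHeartbeats 2000000 in
theorem score_eq_pts (x y : Int) : score x y = pts x y := by
  unfold score pts
  simp only [scoreLoop]
  split_ifs <;> simp_all [PySem.Int.floordiv] <;> omega

-- ===== VERDICT (by name: the statement is the Claim_ definition above) =====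
theorem work_spec : Claim_equal_work := by
  intro s _ hpre
  unfold Pre_work at hpre
  unfold Spec_work work work_alt
  rcases s with _|⟨a0,_|⟨a1,_|⟨a2,_|⟨a3,_|⟨a4,_|⟨a5,_|⟨a6,_|⟨a7,_|⟨a8,_|⟨a9,_|⟨a10,_|⟨a11,rest⟩⟩⟩⟩⟩⟩⟩⟩⟩⟩⟩⟩ <;>
    simp at hpre
  have hr1 : PySem.List.pyRange 0 6 2 = [0, 2, 4] := by decide
  have hr2 : PySem.List.pyRange 6 12 2 = [6, 8, 10] := by decide
  simp only [hr1, hr2, List.foldl]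
  norm_num [PySem.List.pyGetD_ofNat', score_eq_pts]
  split_ifs <;> rfl
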